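-- pv_equiv track=rewrite | github.com/webnizam/edge-ai-sizing-tool | workers/image-classification/main.py | build_compositor_props
-- ===== SOURCE A (Python) =====
-- import math
--
-- def build_compositor_props(num_streams, final_width, final_height):
--     """
--     Build compositor properties for grid layout of multiple streams.
--     """
--     grid_cols = math.ceil(math.sqrt(num_streams))
--     grid_rows = math.ceil(num_streams / grid_cols)
--     sub_width = final_width // grid_cols
--     sub_height = final_height // grid_rows
--
--     comp_props = []
--     for i in range(num_streams):
--         row = i // grid_cols
--         col = i % grid_cols
--         xpos = col * sub_width
--         ypos = row * sub_height
--         comp_props.append(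
--             f"sink_{i}::xpos={xpos} "
--             f"sink_{i}::ypos={ypos} "
--             f"sink_{i}::width={sub_width} "
--             f"sink_{i}::height={sub_height}"
--         )
--     return " ".join(comp_props)
-- ===== SOURCE B (Python) =====
-- import math
--
-- def build_compositor_props(num_streams, final_width, final_height):
--     """
--     Build compositor properties for grid layout of multiple streams.
--     Nested row/column traversal with an explicit counter instead of a
--     flat index loop with div/mod.
--     """
--     grid_cols = math.ceil(math.sqrt(num_streams))
--     grid_rows = math.ceil(num_streams / grid_cols)
--     sub_width = final_width // grid_cols
--     sub_height = final_height // grid_rows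
--
--     parts = []
--     i = 0
--     for row in range(grid_rows):
--         ypos = row * sub_height
--         for col in range(grid_cols):
--             if i >= num_streams:
--                 break
--             parts.append(
--                 f"sink_{i}::xpos={col * sub_width} "
--                 f"sink_{i}::ypos={ypos} "
--                 f"sink_{i}::width={sub_width} "
--                 f"sink_{i}::height={sub_height}"
--             )
--             i += 1
--     return " ".join(parts)
-- ===== Notes on version B (the rewrite author's own statement) =====
-- stated objective: alternative
-- what changed: Replaces the flat index loop that recovers row/col with i//cols and i%cols by nested row/column loops with an explicit counter and an early break on the partial last row, so positions come directly from the loop variables and the div/mod arithmetic disappears.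
import Mathlib
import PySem

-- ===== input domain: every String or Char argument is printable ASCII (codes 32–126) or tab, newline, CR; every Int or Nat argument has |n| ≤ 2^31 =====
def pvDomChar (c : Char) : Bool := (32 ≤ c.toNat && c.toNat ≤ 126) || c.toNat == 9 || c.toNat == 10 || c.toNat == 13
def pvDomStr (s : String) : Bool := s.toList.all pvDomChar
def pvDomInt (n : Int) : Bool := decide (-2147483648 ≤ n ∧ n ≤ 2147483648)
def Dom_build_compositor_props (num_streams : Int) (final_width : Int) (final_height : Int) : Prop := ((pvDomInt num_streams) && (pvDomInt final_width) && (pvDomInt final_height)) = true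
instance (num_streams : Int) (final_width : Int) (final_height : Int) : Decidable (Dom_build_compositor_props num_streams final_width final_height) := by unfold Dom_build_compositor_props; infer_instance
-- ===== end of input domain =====

-- ===== PORT A =====
-- B changes only the loop decomposition: nested row/col loops with a counter and early break
-- instead of a flat index loop recovering row/col by div/mod; return value proved equal on num_streams >= 1.

-- math.ceil(math.sqrt(n)) for 1 <= n: exact integer transcription (double sqrt is exact for |n| <= 2^31)
def pyCeilSqrt (n : Int) : Int :=
  if ((Nat.sqrt n.toNat : Int)) * ((Nat.sqrt n.toNat : Int)) = n
  then ((Nat.sqrt n.toNat : Int)) else ((Nat.sqrt n.toNat : Int)) + 1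

-- math.ceil(a / b) for 0 < b: exact integer transcription -((-a) // b) (double division exact at this scale)
def pyCeilDiv (a b : Int) : Int := -(PySem.Int.floordiv (-a) b)

-- the f-string both Pythons build, verbatim
def sinkStr (i xpos ypos w h : Int) : String :=
  "sink_" ++ PySem.Int.toStr i ++ "::xpos=" ++ PySem.Int.toStr xpos ++
  " sink_" ++ PySem.Int.toStr i ++ "::ypos=" ++ PySem.Int.toStr ypos ++
  " sink_" ++ PySem.Int.toStr i ++ "::width=" ++ PySem.Int.toStr w ++
  " sink_" ++ PySem.Int.toStr i ++ "::height=" ++ PySem.Int.toStr h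

def build_compositor_props (num_streams : Int) (final_width : Int) (final_height : Int) : String :=
  let grid_cols := pyCeilSqrt num_streams
  let grid_rows := pyCeilDiv num_streams grid_cols
  let sub_width := PySem.Int.floordiv final_width grid_cols
  let sub_height := PySem.Int.floordiv final_height grid_rows
  let comp_props := (PySem.List.pyRange 0 num_streams 1).foldl (fun acc i =>
      let row := PySem.Int.floordiv i grid_cols
      let col := PySem.Int.mod i grid_cols
      let xpos := col * sub_width
      let ypos := row * sub_height
      acc ++ [sinkStr i xpos ypos sub_width sub_height]) []
  PySem.Str.join " " comp_props

-- ===== PORT B =====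
def build_compositor_props_alt (num_streams : Int) (final_width : Int) (final_height : Int) : String :=
  let grid_cols := pyCeilSqrt num_streams
  let grid_rows := pyCeilDiv num_streams grid_cols
  let sub_width := PySem.Int.floordiv final_width grid_cols
  let sub_height := PySem.Int.floordiv final_height grid_rows
  let st := (PySem.List.pyRange 0 grid_rows 1).foldl (fun (st : List String × Int) row =>
      let ypos := row * sub_height
      (PySem.List.pyRange 0 grid_cols 1).foldl (fun (st : List String × Int) col =>
          if st.2 ≥ num_streams then st   -- 'break': once the counter hits num_streams nothing more is appended
          else (st.1 ++ [sinkStr st.2 (col * sub_width) ypos sub_width sub_height], st.2 + 1)) st)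
    ([], 0)
  PySem.Str.join " " st.1

-- ===== PRECONDITION & SPEC =====
-- A raises for num_streams <= 0 (ValueError from math.sqrt on negatives, ZeroDivisionError at 0).
def Pre_build_compositor_props (num_streams : Int) (final_width : Int) (final_height : Int) : Prop :=
  1 ≤ num_streams
instance (num_streams : Int) (final_width : Int) (final_height : Int) : Decidable (Pre_build_compositor_props num_streams final_width final_height) := by unfold Pre_build_compositor_props; infer_instance
def pvWitness_build_compositor_props : Int × Int × Int := (5, 1920, 1080)
def Spec_build_compositor_props (num_streams : Int) (final_width : Int) (final_height : Int) (out : String) : Prop := out = build_compositor_props_alt num_streams final_width final_height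
instance (num_streams : Int) (final_width : Int) (final_height : Int) (out : String) : Decidable (Spec_build_compositor_props num_streams final_width final_height out) := by unfold Spec_build_compositor_props; infer_instance

-- ===== CLAIM (what is proved, stated in full; the proofs are below) =====
def Claim_equal_build_compositor_props : Prop := ∀ (num_streams : Int) (final_width : Int) (final_height : Int), Dom_build_compositor_props num_streams final_width final_height → Pre_build_compositor_props num_streams final_width final_height → Spec_build_compositor_props num_streams final_width final_height (build_compositor_props num_streams final_width final_height)

-- ===== LEMMAS AND PROOFS =====

-- the item A produces for flat index i, with row/col recovered by div/mod
def partF (c sw sh : Int) (i : Int) : String :=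
  sinkStr i (PySem.Int.mod i c * sw) (PySem.Int.floordiv i c * sh) sw sh

-- append-accumulating foldl is map
theorem foldl_append_singleton_eq_map {α β : Type} (f : α → β) :
    ∀ (l : List α) (acc : List β),
      l.foldl (fun acc i => acc ++ [f i]) acc = acc ++ l.map f := by
  intro l
  induction l with
  | nil => simp
  | cons x xs ih => intro acc; simp [List.foldl, ih]

theorem mod_of_decomp (c row a : Int) (hc : 0 < c) (hrow : 0 ≤ row) (ha : 0 ≤ a) (hac : a < c) :
    PySem.Int.mod (row * c + a) c = a ∧ PySem.Int.floordiv (row * c + a) c = row := by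
  have hfd : PySem.Int.floordiv (row * c + a) c = row := by
    rw [PySem.Int.floordiv_eq_iff_of_pos hc]
    constructor <;> nlinarith
  refine ⟨?_, hfd⟩
  have h := PySem.Int.floordiv_mul_add_mod (row * c + a) c
  rw [hfd] at h
  omega

-- inner loop: columns of row `row`, from column a on, starting from the invariant state
theorem inner_fold (c n sw sh row : Int) (hc : 0 < c) (hn : 0 ≤ n) (hrow : 0 ≤ row) :
    ∀ (k : Nat) (a : Int), 0 ≤ a → a + k = c →
      (PySem.List.pyRange a c 1).foldl
        (fun (st : List String × Int) col =>
          if st.2 ≥ n then st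
          else (st.1 ++ [sinkStr st.2 (col * sw) (row * sh) sw sh], st.2 + 1))
        ((PySem.List.pyRange 0 (min n (row * c + a)) 1).map (partF c sw sh), min n (row * c + a))
      = ((PySem.List.pyRange 0 (min n (row * c + c)) 1).map (partF c sw sh), min n (row * c + c)) := by
  intro k
  induction k with
  | zero =>
    intro a ha hk
    have hac : a = c := by omega
    subst hac
    rw [PySem.List.pyRange_one_eq_nil (le_refl a)]
    simp
  | succ k ih =>
    intro a ha hk
    have hrc : 0 ≤ row * c := mul_nonneg hrow hc.le
    have hac : a < c := by omega
    rw [PySem.List.pyRange_one_cons hac]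
    simp only [List.foldl_cons]
    by_cases hfull : row * c + a ≥ n
    · have hmin : min n (row * c + a) = n := by omega
      have hmin' : min n (row * c + (a + 1)) = min n (row * c + a) := by omega
      rw [hmin]
      simp only [ge_iff_le, le_refl, if_true]
      have := ih (a + 1) (by omega) (by omega)
      rw [hmin', hmin] at this
      exact this
    · have hm : min n (row * c + a) = row * c + a := by omega
      rw [hm]
      have hcond : ¬ (row * c + a ≥ n) := by omega
      simp only [ge_iff_le, if_neg (by omega : ¬ n ≤ row * c + a)]
      have hdm := mod_of_decomp c row a hc hrow ha hac
      have hpart : sinkStr (row * c + a) (a * sw) (row * sh) sw sh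
          = partF c sw sh (row * c + a) := by
        unfold partF
        rw [hdm.1, hdm.2]
      have hlist : (PySem.List.pyRange 0 (row * c + a) 1).map (partF c sw sh)
            ++ [sinkStr (row * c + a) (a * sw) (row * sh) sw sh]
          = (PySem.List.pyRange 0 (row * c + a + 1) 1).map (partF c sw sh) := by
        rw [PySem.List.pyRange_one_succ_right (by omega : (0:Int) ≤ row * c + a)]
        simp [hpart]
      have hmin1 : min n (row * c + (a + 1)) = row * c + a + 1 := by omega
      have := ih (a + 1) (by omega) (by omega)
      rw [hmin1] at this
      rw [hlist]
      exact this

-- outer loop invariant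
theorem outer_fold (c n sw sh : Int) (hc : 0 < c) (hn : 0 ≤ n) :
    ∀ (t : Int), 0 ≤ t →
      (PySem.List.pyRange 0 t 1).foldl
        (fun (st : List String × Int) row =>
          (PySem.List.pyRange 0 c 1).foldl
            (fun (st : List String × Int) col =>
              if st.2 ≥ n then st
              else (st.1 ++ [sinkStr st.2 (col * sw) (row * sh) sw sh], st.2 + 1)) st)
        ([], 0)
      = ((PySem.List.pyRange 0 (min n (t * c)) 1).map (partF c sw sh), min n (t * c)) := by
  intro t ht
  induction t, ht using Int.le_induction with
  | base =>
    rw [PySem.List.pyRange_one_eq_nil (le_refl 0)]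
    simp
    omega
  | succ t ht ih =>
    rw [PySem.List.pyRange_one_succ_right ht, List.foldl_append, ih]
    simp only [List.foldl_cons, List.foldl_nil]
    have h0 : min n (t * c) = min n (t * c + 0) := by omega
    have := inner_fold c n sw sh t hc hn ht c.toNat 0 (le_refl 0) (by omega)
    rw [← h0] at this
    rw [this]
    have : t * c + c = (t + 1) * c := by ring
    rw [this]

-- ===== VERDICT (by name: the statement is the Claim_ definition above) =====
theorem build_compositor_props_spec : Claim_equal_build_compositor_props := by
  intro n w h _ hpre
  unfold Pre_build_compositor_props at hpre
  unfold Spec_build_compositor_props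
  unfold build_compositor_props build_compositor_props_alt
  set c := pyCeilSqrt n with hc_def
  have hc : 0 < c := by
    rw [hc_def]; unfold pyCeilSqrt
    split
    · rename_i heq
      rcases Nat.eq_zero_or_pos (Nat.sqrt n.toNat) with h0 | h1
      · rw [h0] at heq; simp at heq; omega
      · omega
    · have := Int.natCast_nonneg (Nat.sqrt n.toNat); omega
  set r := pyCeilDiv n c with hr_def
  have hr : n ≤ r * c := by
    have heq : -(PySem.Int.floordiv (-n) c) = r := by rw [hr_def]; rfl
    exact ((PySem.Int.neg_floordiv_neg_eq_iff_of_pos hc).mp heq).2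
  have hrpos : 0 ≤ r := by nlinarith
  set sw := PySem.Int.floordiv w c
  set sh := PySem.Int.floordiv h r
  have hA : (PySem.List.pyRange 0 n 1).foldl (fun acc i =>
        acc ++ [sinkStr i (PySem.Int.mod i c * sw) (PySem.Int.floordiv i c * sh) sw sh]) []
      = (PySem.List.pyRange 0 n 1).map (partF c sw sh) := by
    have := foldl_append_singleton_eq_map (partF c sw sh) (PySem.List.pyRange 0 n 1) []
    simpa [partF] using this
  have hB := outer_fold c n sw sh hc (by omega) r hrpos
  have hmin : min n (r * c) = n := by omega
  rw [hmin] at hB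
  dsimp only
  rw [hA, hB]
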